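-- pv_equiv track=rewrite | github.com/EmmettJT/sequences_behaviour | Utilities/single_session_functions.py | Find_Transition_times_sns
-- ===== SOURCE A (Python) =====
-- def Find_Transition_times_sns(TransitionLatency_Tfilt,TransitionTypes_Tfilt,Transitions):
--     transit_times = []
--     transit_type = []
--     for i,Transits in enumerate(Transitions):
--         transit_times_temp = []
--         for ind, transition_pair in enumerate(TransitionTypes_Tfilt):
--             if transition_pair == Transits:
--                 transit_times_temp = transit_times_temp + [TransitionLatency_Tfilt[ind]]
--
--         transit_times = transit_times + transit_times_temp
--         transit_type = transit_type + len(transit_times_temp)*[i+1]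
--     return(transit_times,transit_type)
-- ===== SOURCE B (Python) =====
-- def Find_Transition_times_sns(TransitionLatency_Tfilt, TransitionTypes_Tfilt, Transitions):
--     groups = {}
--     for tp, lat in zip(TransitionTypes_Tfilt, TransitionLatency_Tfilt):
--         groups.setdefault(tp, []).append(lat)
--     transit_times = [x for t in Transitions for x in groups.get(t, [])]
--     transit_type = [i + 1 for i, t in enumerate(Transitions) for _ in groups.get(t, [])]
--     return (transit_times, transit_type)
-- ===== Notes on version B (the rewrite author's own statement) =====
-- stated objective: faster
-- what changed: One pass over zip(types,latencies) builds a dict transition_pair -> ordered latency list, then each Transitions entry is a single dict lookup instead of rescanning the whole TransitionTypes list (and quadratic list-concatenation is replaced by comprehensions).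
import Mathlib
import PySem

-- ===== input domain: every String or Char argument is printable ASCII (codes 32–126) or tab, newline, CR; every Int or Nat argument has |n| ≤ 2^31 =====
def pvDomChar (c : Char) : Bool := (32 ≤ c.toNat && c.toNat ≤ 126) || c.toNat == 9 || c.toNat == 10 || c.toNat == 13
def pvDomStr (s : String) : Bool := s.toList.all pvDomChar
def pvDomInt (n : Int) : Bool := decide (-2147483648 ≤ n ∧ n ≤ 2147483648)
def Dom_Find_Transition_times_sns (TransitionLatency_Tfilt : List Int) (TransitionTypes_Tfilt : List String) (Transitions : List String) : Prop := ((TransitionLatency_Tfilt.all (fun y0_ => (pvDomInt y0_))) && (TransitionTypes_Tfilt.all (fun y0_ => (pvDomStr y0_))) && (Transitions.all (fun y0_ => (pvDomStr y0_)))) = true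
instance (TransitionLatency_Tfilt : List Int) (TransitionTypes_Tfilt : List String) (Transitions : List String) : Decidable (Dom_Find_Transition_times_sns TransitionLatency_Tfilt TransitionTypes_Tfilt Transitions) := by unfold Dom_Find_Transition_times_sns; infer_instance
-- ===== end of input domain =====

-- B groups latencies by transition type in one pass over zip(types, latencies) into a dict,
-- then reads each Transitions entry off with a single lookup (objective: faster, asymptotic).


-- ===== PORT A =====
-- inner loop of A: scan all of TransitionTypes_Tfilt, collect TransitionLatency_Tfilt[ind] on a match.
-- pyGet? = none is Python's IndexError; the .getD 0 is reached only outside Pre_ (excluded there).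
def ftA_inner (TransitionLatency_Tfilt : List Int) (TransitionTypes_Tfilt : List String) (Transits : String) : List Int :=
  (PySem.List.enumerate TransitionTypes_Tfilt 0).foldl
    (fun temp p => if p.2 == Transits then temp ++ [(PySem.List.pyGet? TransitionLatency_Tfilt p.1).getD 0] else temp) []

def Find_Transition_times_sns (TransitionLatency_Tfilt : List Int) (TransitionTypes_Tfilt : List String) (Transitions : List String) : List Int × List Int :=
  (PySem.List.enumerate Transitions 0).foldl
    (fun st p =>
      let temp := ftA_inner TransitionLatency_Tfilt TransitionTypes_Tfilt p.2
      (st.1 ++ temp, st.2 ++ List.replicate temp.length (p.1 + 1)))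
    ([], [])

-- ===== PORT B =====
-- groups.setdefault(tp, []).append(lat)  ==  groups[tp] = groups.get(tp, []) + [lat]  ==  Dict.modify
def ftB_groups (TransitionLatency_Tfilt : List Int) (TransitionTypes_Tfilt : List String) : PySem.Dict String (List Int) :=
  (TransitionTypes_Tfilt.zip TransitionLatency_Tfilt).foldl
    (fun d p => d.modify p.1 [] (· ++ [p.2])) PySem.Dict.empty

def Find_Transition_times_sns_alt (TransitionLatency_Tfilt : List Int) (TransitionTypes_Tfilt : List String) (Transitions : List String) : List Int × List Int :=
  let groups := ftB_groups TransitionLatency_Tfilt TransitionTypes_Tfilt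
  (Transitions.flatMap (fun t => groups.getD t []),
   (PySem.List.enumerate Transitions 0).flatMap (fun p => (groups.getD p.2 []).map (fun _ => p.1 + 1)))

-- ===== PRECONDITION & SPEC =====
-- Pre_ excludes exactly the inputs where A raises IndexError: some entry of TransitionTypes_Tfilt
-- that occurs in Transitions sits at an index out of range for TransitionLatency_Tfilt.
def Pre_Find_Transition_times_sns (TransitionLatency_Tfilt : List Int) (TransitionTypes_Tfilt : List String) (Transitions : List String) : Prop :=
  ∀ p ∈ PySem.List.enumerate TransitionTypes_Tfilt 0, p.2 ∈ Transitions → p.1 < (TransitionLatency_Tfilt.length : Int)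
instance (TransitionLatency_Tfilt : List Int) (TransitionTypes_Tfilt : List String) (Transitions : List String) : Decidable (Pre_Find_Transition_times_sns TransitionLatency_Tfilt TransitionTypes_Tfilt Transitions) := by unfold Pre_Find_Transition_times_sns; infer_instance

def pvWitness_Find_Transition_times_sns : List Int × List String × List String :=
  ([3, 5, 7], ["a", "b", "a"], ["a", "b"])

def Spec_Find_Transition_times_sns (TransitionLatency_Tfilt : List Int) (TransitionTypes_Tfilt : List String) (Transitions : List String) (out : List Int × List Int) : Prop := out = Find_Transition_times_sns_alt TransitionLatency_Tfilt TransitionTypes_Tfilt Transitions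
instance (TransitionLatency_Tfilt : List Int) (TransitionTypes_Tfilt : List String) (Transitions : List String) (out : List Int × List Int) : Decidable (Spec_Find_Transition_times_sns TransitionLatency_Tfilt TransitionTypes_Tfilt Transitions out) := by unfold Spec_Find_Transition_times_sns; infer_instance

-- ===== CLAIM (what is proved, stated in full; the proofs are below) =====
def Claim_equal_Find_Transition_times_sns : Prop := ∀ (TransitionLatency_Tfilt : List Int) (TransitionTypes_Tfilt : List String) (Transitions : List String), Dom_Find_Transition_times_sns TransitionLatency_Tfilt TransitionTypes_Tfilt Transitions → Pre_Find_Transition_times_sns TransitionLatency_Tfilt TransitionTypes_Tfilt Transitions → Spec_Find_Transition_times_sns TransitionLatency_Tfilt TransitionTypes_Tfilt Transitions (Find_Transition_times_sns TransitionLatency_Tfilt TransitionTypes_Tfilt Transitions)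

-- ===== LEMMAS AND PROOFS =====

-- A's inner scan, with a running start index, equals the filtered zip against the latency tail.
lemma ftA_inner_eq_filter (lat : List Int) (tr : String) :
    ∀ (types : List String) (k : Nat) (acc : List Int),
    (∀ j, (hj : j < types.length) → types[j] = tr → k + j < lat.length) →
    (PySem.List.enumerate types (k : Int)).foldl
      (fun temp p => if p.2 == tr then temp ++ [(PySem.List.pyGet? lat p.1).getD 0] else temp) acc
    = acc ++ ((types.zip (lat.drop k)).filter (fun p => p.1 == tr)).map (·.2) := by
  intro types
  induction types with
  | nil => intro k acc _; simp [PySem.List.enumerate_nil]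
  | cons s rest ih =>
    intro k acc h
    rw [PySem.List.enumerate_cons]
    by_cases hs : s = tr
    · have hk : k < lat.length := by
        have := h 0 (by simp) (by simpa using hs); simpa using this
      have hdrop : lat.drop k = lat[k] :: lat.drop (k + 1) := List.drop_eq_getElem_cons hk
      have hget : PySem.List.pyGet? lat (k : Int) = some lat[k] := by
        rw [PySem.List.pyGet?_natCast]; exact List.getElem?_eq_getElem hk
      have ih' := ih (k + 1) (acc ++ [lat[k]]) (by
        intro j hj hjt
        have := h (j + 1) (by simpa using Nat.succ_lt_succ hj) (by simpa using hjt)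
        omega)
      simp only [List.foldl_cons, hs, beq_self_eq_true, if_pos, hget, Option.getD_some]
      have : ((k : Int) + 1) = ((k + 1 : Nat) : Int) := by push_cast; ring
      rw [this, ih', hdrop]
      simp only [List.zip_cons_cons, List.filter_cons, beq_self_eq_true, if_true,
        List.map_cons, List.append_assoc, List.cons_append, List.nil_append]
    · have ih' := ih (k + 1) acc (by
        intro j hj hjt
        have := h (j + 1) (by simpa using Nat.succ_lt_succ hj) (by simpa using hjt)
        omega)
      have hbeq : (s == tr) = false := by simpa using hs
      simp only [List.foldl_cons, hbeq, if_neg, Bool.false_eq_true, not_false_iff]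
      have : ((k : Int) + 1) = ((k + 1 : Nat) : Int) := by push_cast; ring
      rw [this, ih']
      rcases Nat.lt_or_ge k lat.length with hk | hk
      · rw [List.drop_eq_getElem_cons hk]
        simp only [List.zip_cons_cons, List.filter_cons, hbeq, Bool.false_eq_true, if_false]
      · rw [List.drop_eq_nil_of_le hk, List.drop_eq_nil_of_le (by omega)]
        simp

-- B's dict lookup equals the same filtered zip.
lemma ftB_getD (lat : List Int) (types : List String) (tr : String) :
    (ftB_groups lat types).getD tr []
      = ((types.zip lat).filter (fun p => p.1 == tr)).map (·.2) := by
  unfold ftB_groups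
  rw [PySem.Dict.getD_foldl_modify_append]
  simp [PySem.Dict.getD_empty]

lemma flatMap_congr_mem {α β : Type} (l : List α) (f g : α → List β)
    (h : ∀ a ∈ l, f a = g a) : l.flatMap f = l.flatMap g := by
  induction l with
  | nil => rfl
  | cons x xs ih =>
    simp only [List.flatMap_cons]
    rw [h x (by simp), ih (fun a ha => h a (List.mem_cons_of_mem _ ha))]

-- A's outer loop unfolded into the two flatMaps over the enumerate list.
lemma outerA {g : String → List Int} :
    ∀ (en : List (Int × String)) (ts ty : List Int),
    en.foldl (fun st p => (st.1 ++ g p.2, st.2 ++ List.replicate (g p.2).length (p.1 + 1))) (ts, ty)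
    = (ts ++ en.flatMap (fun p => g p.2),
       ty ++ en.flatMap (fun p => (g p.2).map (fun _ => p.1 + 1))) := by
  intro en
  induction en with
  | nil => intro ts ty; simp
  | cons q qs ih =>
    intro ts ty
    simp only [List.foldl_cons, List.flatMap_cons, ih]
    simp [List.map_const', List.append_assoc]

lemma flatMap_enumerate_snd {α β : Type} (f : α → List β) :
    ∀ (l : List α) (s : Int), (PySem.List.enumerate l s).flatMap (fun p => f p.2) = l.flatMap f := by
  intro l
  induction l with
  | nil => intro s; simp [PySem.List.enumerate_nil]
  | cons x xs ih => intro s; rw [PySem.List.enumerate_cons]; simp [ih]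

-- ===== VERDICT (by name: the statement is the Claim_ definition above) =====
theorem Find_Transition_times_sns_spec : Claim_equal_Find_Transition_times_sns := by
  intro lat types trans _ hpre
  unfold Spec_Find_Transition_times_sns Find_Transition_times_sns Find_Transition_times_sns_alt
  have hinner : ∀ t ∈ trans, ftA_inner lat types t = (ftB_groups lat types).getD t [] := by
    intro t ht
    rw [ftB_getD]
    unfold ftA_inner
    have hfil := ftA_inner_eq_filter lat t types 0 [] ?_
    · simpa using hfil
    · intro j hj hjt
      have hp : ((j : Int), types[j]) ∈ PySem.List.enumerate types 0 := by
        rw [PySem.List.mem_enumerate_iff]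
        exact ⟨j, hj, by simp⟩
      have := hpre _ hp (by simpa [hjt] using ht)
      simpa using this
  rw [outerA]
  have hmem : ∀ p ∈ PySem.List.enumerate trans 0, p.2 ∈ trans := by
    intro p hp
    rw [PySem.List.mem_enumerate_iff] at hp
    obtain ⟨k, hk, rfl⟩ := hp
    simp
  simp only [List.nil_append, Prod.ext_iff]
  constructor
  · exact (flatMap_congr_mem _ _ _ (fun p hp => hinner p.2 (hmem p hp))).trans
      (flatMap_enumerate_snd _ trans 0)
  · exact flatMap_congr_mem _ _ _ (fun p hp => by rw [hinner p.2 (hmem p hp)])
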